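-- pv_equiv track=rewrite | github.com/Karabofrank/Python_practice_test | Assessment /Part1.py | character_frequency_per_word
-- ===== SOURCE A (Python) =====
-- def character_frequency_per_word(sentence):
--     """Return a dictionary of character frequencies for each word in a sentence"""
--     a = {}
--     b = {}
--     sentence = sentence.split(" ")
--     for word in sentence:
--         b[word] = {}
--         for i in word:
--             if i in b[word]:
--                 b[word][i] += 1
--             else:
--                 b[word][i] = 1
--     return b
-- ===== SOURCE B (Python) =====
-- def character_frequency_per_word(sentence):
--     """Return a dictionary of character frequencies for each word in a sentence"""
--     return {w: {c: w.count(c) for c in dict.fromkeys(w)}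
--             for w in sentence.split(" ")}
-- ===== Notes on version B (the rewrite author's own statement) =====
-- stated objective: idiomatic
-- what changed: Replaces the two accumulating loops (mutated outer dict, per-character increment pass) with a single dict comprehension whose inner map is built by iterating the word's distinct characters (dict.fromkeys) and counting each with str.count, i.e. rescans instead of one accumulating pass.
import Mathlib
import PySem

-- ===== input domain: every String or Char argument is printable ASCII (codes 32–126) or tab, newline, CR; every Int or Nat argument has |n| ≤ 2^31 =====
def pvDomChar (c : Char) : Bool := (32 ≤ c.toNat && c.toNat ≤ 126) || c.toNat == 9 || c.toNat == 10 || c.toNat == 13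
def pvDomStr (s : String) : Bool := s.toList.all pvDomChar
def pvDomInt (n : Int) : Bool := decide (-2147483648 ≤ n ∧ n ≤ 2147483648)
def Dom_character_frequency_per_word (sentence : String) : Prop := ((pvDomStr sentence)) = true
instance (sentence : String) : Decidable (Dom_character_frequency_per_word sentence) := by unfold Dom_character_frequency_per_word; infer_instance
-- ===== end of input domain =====

-- B replaces A's two accumulating loops by a dict comprehension counting each distinct character by rescanning the word (idiomatic; not faster).

-- ===== PORT A =====
-- the separator " " is a non-empty literal, so split? is always `some`; the getD default never fires
def character_frequency_per_word (sentence : String) : List (String × List (String × Int)) :=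
  let words := (PySem.Str.split? sentence " ").getD []
  let b : PySem.Dict String (PySem.Dict String Int) :=
    words.foldl (fun b word =>
      word.toList.foldl (fun b i =>
        let d := b.getD word PySem.Dict.empty
        let k := String.singleton i
        if d.contains k then b.insert word (d.insert k (d.getD k 0 + 1))
        else b.insert word (d.insert k 1)) (b.insert word PySem.Dict.empty)) PySem.Dict.empty
  b.items.map (fun p => (p.1, p.2.items))

-- ===== PORT B =====
-- inner dict comprehension {c: w.count(c) for c in dict.fromkeys(w)}
def pvInnerFreq (w : String) : PySem.Dict String Int :=
  (PySem.List.dedup w.toList).foldl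
    (fun d c => d.insert (String.singleton c) ((w.toList.count c : Int))) PySem.Dict.empty

def character_frequency_per_word_alt (sentence : String) : List (String × List (String × Int)) :=
  (((PySem.Str.split? sentence " ").getD []).foldl
     (fun b w => b.insert w (pvInnerFreq w).items) PySem.Dict.empty).items

-- ===== PRECONDITION & SPEC =====
def Spec_character_frequency_per_word (sentence : String) (out : List (String × List (String × Int))) : Prop := out = character_frequency_per_word_alt sentence
instance (sentence : String) (out : List (String × List (String × Int))) : Decidable (Spec_character_frequency_per_word sentence out) := by unfold Spec_character_frequency_per_word; infer_instance

-- ===== CLAIM (what is proved, stated in full; the proofs are below) =====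
def Claim_equal_character_frequency_per_word : Prop := ∀ (sentence : String), Dom_character_frequency_per_word sentence → Spec_character_frequency_per_word sentence (character_frequency_per_word sentence)

-- ===== LEMMAS AND PROOFS =====

-- A's inner loop, hoisted out of the big dict: it only touches the entry `word`
theorem pv_inner_hoist (l : List Char) (word : String) :
    ∀ (b : PySem.Dict String (PySem.Dict String Int)) (d : PySem.Dict String Int),
    l.foldl (fun b i =>
        let d := b.getD word PySem.Dict.empty
        let k := String.singleton i
        if d.contains k then b.insert word (d.insert k (d.getD k 0 + 1))
        else b.insert word (d.insert k 1)) (b.insert word d)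
      = b.insert word (l.foldl (fun d i =>
          let k := String.singleton i
          if d.contains k then d.insert k (d.getD k 0 + 1) else d.insert k 1) d) := by
  induction l with
  | nil => intro b d; rfl
  | cons a t ih =>
    intro b d
    simp only [List.foldl_cons, PySem.Dict.getD_insert_self]
    by_cases h : d.contains (String.singleton a) = true
    · simp only [h, if_pos, PySem.Dict.insert_insert_self, ih]
    · simp only [eq_false_of_ne_true h, if_neg, Bool.false_eq_true, not_false_iff,
        PySem.Dict.insert_insert_self, ih]

-- A's inner loop on an empty start dict is Counter(word chars as 1-char strings)
theorem pv_inner_counter (l : List Char) :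
    l.foldl (fun d i =>
        let k := String.singleton i
        if d.contains k then d.insert k (d.getD k 0 + 1) else d.insert k 1)
      (PySem.Dict.empty : PySem.Dict String Int)
      = PySem.Dict.counter (l.map String.singleton) := by
  rw [← PySem.Dict.foldl_insert_getD_add_one_eq_counter, List.foldl_map]
  apply PySem.List.foldl_congr_mem
  intro d i _
  by_cases h : d.contains (String.singleton i) = true
  · simp [h]
  · have h' : d.contains (String.singleton i) = false := eq_false_of_ne_true h
    simp [h', PySem.Dict.getD_of_not_contains _ _ h']

theorem pv_singleton_injective : Function.Injective String.singleton := by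
  intro a b h
  have : (String.singleton a).toList = (String.singleton b).toList := by rw [h]
  simpa [String.singleton] using this

theorem pv_foldl_add_map (f : Char → String) (hf : Function.Injective f) (l : List Char) :
    ∀ t : List Char,
    (l.map f).foldl PySem.Set.add (t.map f) = (l.foldl PySem.Set.add t).map f := by
  induction l with
  | nil => intro t; rfl
  | cons a l ih =>
    intro t
    simp only [List.map_cons, List.foldl_cons]
    have : PySem.Set.add (t.map f) (f a) = (PySem.Set.add t a).map f := by
      by_cases h : a ∈ t
      · simp [PySem.Set.add, PySem.Set.contains, h, List.mem_map_of_mem]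
      · have : f a ∉ t.map f := fun hm => h (by
          obtain ⟨x, hx, he⟩ := List.mem_map.1 hm
          exact (hf he) ▸ hx)
        simp [PySem.Set.add, PySem.Set.contains, h, this]
    rw [this, ih]

theorem pv_dedup_map (l : List Char) :
    PySem.List.dedup (l.map String.singleton) = (PySem.List.dedup l).map String.singleton := by
  simp only [PySem.List.dedup_eq_ofList, PySem.Set.ofList_eq_foldl]
  simpa using pv_foldl_add_map String.singleton pv_singleton_injective l []

-- per word, A's inner dict and B's inner item list have the same items
theorem pv_inner_items_eq (w : String) :
    (PySem.Dict.counter (w.toList.map String.singleton)).items = (pvInnerFreq w).items := by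
  have fresh : ∀ (l : List Char), l.Nodup →
      ((l.foldl (fun d c => d.insert (String.singleton c) ((w.toList.count c : Int)))
        (PySem.Dict.empty : PySem.Dict String Int)).items)
      = l.map (fun c => (String.singleton c, (w.toList.count c : Int))) := by
    intro l hl
    suffices h : ∀ (l : List Char) (d : PySem.Dict String Int), l.Nodup →
        (∀ c ∈ l, d.contains (String.singleton c) = false) →
        (l.foldl (fun d c => d.insert (String.singleton c) ((w.toList.count c : Int))) d).items
          = d.items ++ l.map (fun c => (String.singleton c, (w.toList.count c : Int))) by
      simpa using h l PySem.Dict.empty hl (fun c _ => PySem.Dict.contains_empty _)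
    intro l
    induction l with
    | nil => intro d _ _; simp
    | cons a t ih =>
      intro d hnd hfresh
      simp only [List.foldl_cons, List.map_cons]
      rw [ih _ (hnd.of_cons) ?_, PySem.Dict.items_insert_of_not_contains _ _ (hfresh a (List.mem_cons_self ..))]
      · simp
      · intro c hc
        rw [PySem.Dict.contains_insert]
        have : c ≠ a := fun he => (List.nodup_cons.1 hnd).1 (he ▸ hc)
        simp [hfresh c (List.mem_cons_of_mem _ hc), pv_singleton_injective.ne this]
  rw [PySem.Dict.items_counter, ← PySem.List.dedup_eq_ofList, pv_dedup_map w.toList]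
  unfold pvInnerFreq
  rw [fresh _ (PySem.List.nodup_dedup _), List.map_map]
  apply List.map_congr_left
  intro c _
  simp [List.count_map_of_injective _ _ pv_singleton_injective]

-- outer fold: mapping items over A's dict-of-dicts tracks B's dict-of-lists
theorem pv_outer (ws : List String) :
    ∀ (bA : PySem.Dict String (PySem.Dict String Int)) (bB : PySem.Dict String (List (String × Int))),
    bB.items = bA.items.map (fun p => (p.1, p.2.items)) →
    (ws.foldl (fun b w => b.insert w (PySem.Dict.counter (w.toList.map String.singleton))) bA).items.map
        (fun p => (p.1, p.2.items))
      = (ws.foldl (fun b w => b.insert w (pvInnerFreq w).items) bB).items := by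
  induction ws with
  | nil => intro bA bB h; exact h.symm
  | cons w t ih =>
    intro bA bB h
    simp only [List.foldl_cons]
    apply ih
    have hkeys : bB.keys = bA.keys := by
      show bB.items.map Prod.fst = bA.items.map Prod.fst
      simp [h]
    by_cases hc : bA.contains w = true
    · have hcB : bB.contains w = true := by
        rw [PySem.Dict.contains_eq_decide_mem_keys] at hc ⊢
        rw [hkeys]; exact hc
      rw [PySem.Dict.items_insert_of_contains _ _ hc, PySem.Dict.items_insert_of_contains _ _ hcB,
        h, List.map_map, List.map_map]
      apply List.map_congr_left
      intro p _
      by_cases hp : p.1 = w <;> simp [hp, pv_inner_items_eq]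
    · have hc' : bA.contains w = false := eq_false_of_ne_true hc
      have hcB : bB.contains w = false := by
        rw [PySem.Dict.contains_eq_decide_mem_keys] at hc' ⊢
        rw [hkeys]; exact hc'
      rw [PySem.Dict.items_insert_of_not_contains _ _ hc', PySem.Dict.items_insert_of_not_contains _ _ hcB, h]
      simp [pv_inner_items_eq]

-- ===== VERDICT (by name: the statement is the Claim_ definition above) =====
theorem character_frequency_per_word_spec : Claim_equal_character_frequency_per_word := by
  intro sentence _
  show _ = _
  unfold character_frequency_per_word character_frequency_per_word_alt
  have h1 := PySem.List.foldl_congr_mem ((PySem.Str.split? sentence " ").getD [])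
      (fun b word => word.toList.foldl (fun b i =>
        let d := b.getD word PySem.Dict.empty
        let k := String.singleton i
        if d.contains k then b.insert word (d.insert k (d.getD k 0 + 1))
        else b.insert word (d.insert k 1)) (b.insert word PySem.Dict.empty))
      (fun b w => b.insert w (PySem.Dict.counter (w.toList.map String.singleton)))
      PySem.Dict.empty
      (fun b w _ => by dsimp only; rw [pv_inner_hoist, pv_inner_counter])
  simp only []
  rw [h1]
  exact pv_outer _ PySem.Dict.empty PySem.Dict.empty rfl
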